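-- pv_equiv track=rewrite | github.com/skylinkapi/SkyLink-API-V3 | charts_aerodrome/sources/taiwan_scraper.py | categorize_chart
-- ===== SOURCE A (Python) =====
-- def categorize_chart(chart_name):
--     """Categorize a chart based on its name."""
--     name_lower = chart_name.lower()
--
--     # SID - Standard Instrument Departure
--     if 'sid' in name_lower or 'departure' in name_lower:
--         return 'SID'
--
--     # STAR - Standard Terminal Arrival
--     if 'star' in name_lower or 'arrival' in name_lower:
--         return 'STAR'
--
--     # Approach charts
--     if any(keyword in name_lower for keyword in ['approach', 'ils', 'rnav', 'vor', 'ndb', 'rnp', 'gnss', 'visual apch']):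
--         return 'Approach'
--
--     # Airport diagrams
--     if any(keyword in name_lower for keyword in ['aerodrome chart', 'airport', 'parking', 'taxi', 'apron', 'ground movement', 'obstruction']):
--         return 'Airport Diagram'
--
--     # Noise abatement
--     if 'noise' in name_lower:
--         return 'Noise Abatement'
--
--     # Heliport
--     if 'heliport' in name_lower or 'helicopter' in name_lower:
--         return 'Heliport'
--
--     # Default
--     return 'General'
-- ===== SOURCE B (Python) =====
-- # Single left-to-right scan over the name's positions with a priority accumulator,
-- # instead of per-category substring tests.
-- _TABLE = [
--     ("sid", 0), ("departure", 0),
--     ("star", 1), ("arrival", 1),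
--     ("approach", 2), ("ils", 2), ("rnav", 2), ("vor", 2), ("ndb", 2),
--     ("rnp", 2), ("gnss", 2), ("visual apch", 2),
--     ("aerodrome chart", 3), ("airport", 3), ("parking", 3), ("taxi", 3),
--     ("apron", 3), ("ground movement", 3), ("obstruction", 3),
--     ("noise", 4),
--     ("heliport", 5), ("helicopter", 5),
-- ]
-- _NAMES = ["SID", "STAR", "Approach", "Airport Diagram", "Noise Abatement", "Heliport"]
--
--
-- def categorize_chart(chart_name):
--     """Categorize a chart based on its name."""
--     name = chart_name.lower()
--     best = 6
--     for i in range(len(name)):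
--         for kw, p in _TABLE:
--             if p < best and name.startswith(kw, i):
--                 best = p
--     return _NAMES[best] if best < 6 else "General"
-- ===== Notes on version B (the rewrite author's own statement) =====
-- stated objective: alternative
-- what changed: Instead of testing each category's keywords for substring containment in priority order, B makes a single left-to-right scan over the positions of the lowered name, checking at each position which keywords start there and keeping the minimum category priority seen; it trades the speed of the library substring search for a uniform one-pass position scan.
import Mathlib
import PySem

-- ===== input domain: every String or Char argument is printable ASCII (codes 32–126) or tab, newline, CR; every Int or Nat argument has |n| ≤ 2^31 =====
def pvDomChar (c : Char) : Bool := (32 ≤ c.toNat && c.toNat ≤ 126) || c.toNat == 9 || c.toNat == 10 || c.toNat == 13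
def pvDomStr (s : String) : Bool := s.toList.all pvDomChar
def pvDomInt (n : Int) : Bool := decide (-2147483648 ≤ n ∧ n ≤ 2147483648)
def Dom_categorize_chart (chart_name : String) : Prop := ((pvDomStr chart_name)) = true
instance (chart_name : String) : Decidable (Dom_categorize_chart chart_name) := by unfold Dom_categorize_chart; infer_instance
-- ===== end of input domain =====

-- B scans the lowered name position-by-position, keeping the minimum category priority of any
-- keyword starting there, instead of A's ordered per-category substring tests; objective: alternative.


-- ===== PORT A =====
def categorize_chart (chart_name : String) : String :=
  let name_lower := PySem.Str.lower chart_name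
  if PySem.Str.isIn "sid" name_lower || PySem.Str.isIn "departure" name_lower then "SID"
  else if PySem.Str.isIn "star" name_lower || PySem.Str.isIn "arrival" name_lower then "STAR"
  else if (["approach", "ils", "rnav", "vor", "ndb", "rnp", "gnss", "visual apch"]).any
      (fun keyword => PySem.Str.isIn keyword name_lower) then "Approach"
  else if (["aerodrome chart", "airport", "parking", "taxi", "apron", "ground movement", "obstruction"]).any
      (fun keyword => PySem.Str.isIn keyword name_lower) then "Airport Diagram"
  else if PySem.Str.isIn "noise" name_lower then "Noise Abatement"
  else if PySem.Str.isIn "heliport" name_lower || PySem.Str.isIn "helicopter" name_lower then "Heliport"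
  else "General"

-- ===== PORT B =====
def pvTable : List (String × Nat) :=
  [ ("sid", 0), ("departure", 0),
    ("star", 1), ("arrival", 1),
    ("approach", 2), ("ils", 2), ("rnav", 2), ("vor", 2), ("ndb", 2),
    ("rnp", 2), ("gnss", 2), ("visual apch", 2),
    ("aerodrome chart", 3), ("airport", 3), ("parking", 3), ("taxi", 3),
    ("apron", 3), ("ground movement", 3), ("obstruction", 3),
    ("noise", 4),
    ("heliport", 5), ("helicopter", 5) ]

def pvNames : List String := ["SID", "STAR", "Approach", "Airport Diagram", "Noise Abatement", "Heliport"]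

-- inner loop: `for kw, p in _TABLE: if p < best and name.startswith(kw, i): best = p`;
-- `name.startswith(kw, i)` = kw.toList <+: (suffix at i), exact for start positions inside the string.
def pvStep (suff : List Char) (best : Nat) : Nat :=
  pvTable.foldl (fun b kp => if kp.2 < b && PySem.Chars.startswith suff kp.1.toList then kp.2 else b) best

-- outer loop over i in range(len(name)), represented by the successive nonempty suffixes
def pvScan : List Char → Nat → Nat
  | [], best => best
  | c :: rest, best => pvScan rest (pvStep (c :: rest) best)

def categorize_chart_alt (chart_name : String) : String :=
  let cs := (PySem.Str.lower chart_name).toList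
  let best := pvScan cs 6
  if best < 6 then pvNames.getD best "General" else "General"

-- ===== PRECONDITION & SPEC =====
def Spec_categorize_chart (chart_name : String) (out : String) : Prop := out = categorize_chart_alt chart_name
instance (chart_name : String) (out : String) : Decidable (Spec_categorize_chart chart_name out) := by unfold Spec_categorize_chart; infer_instance

-- ===== CLAIM (what is proved, stated in full; the proofs are below) =====
def Claim_equal_categorize_chart : Prop := ∀ (chart_name : String), Dom_categorize_chart chart_name → Spec_categorize_chart chart_name (categorize_chart chart_name)

-- ===== LEMMAS AND PROOFS =====

-- the category-j "some keyword matches" boolean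
def pvGroup : Nat → List String
  | 0 => ["sid", "departure"]
  | 1 => ["star", "arrival"]
  | 2 => ["approach", "ils", "rnav", "vor", "ndb", "rnp", "gnss", "visual apch"]
  | 3 => ["aerodrome chart", "airport", "parking", "taxi", "apron", "ground movement", "obstruction"]
  | 4 => ["noise"]
  | 5 => ["heliport", "helicopter"]
  | _ => []

def pvBl (cs : List Char) (p : Nat) : Bool :=
  (pvGroup p).any (fun kw => PySem.Chars.isIn kw.toList cs)

-- generic facts about the inner foldl (pvStep = pvStepT pvTable)
def pvStepT (tbl : List (String × Nat)) (suff : List Char) (b : Nat) : Nat :=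
  tbl.foldl (fun b kp => if kp.2 < b && PySem.Chars.startswith suff kp.1.toList then kp.2 else b) b

theorem pvStepT_le (tbl : List (String × Nat)) (suff : List Char) (b : Nat) :
    pvStepT tbl suff b ≤ b := by
  induction tbl generalizing b with
  | nil => simp [pvStepT]
  | cons kp rest ih =>
      simp only [pvStepT, List.foldl_cons]
      split
      · rename_i h
        simp only [Bool.and_eq_true, decide_eq_true_eq] at h
        exact le_trans (ih kp.2) (le_of_lt h.1)
      · exact ih b

theorem pvStepT_le_of_match (tbl : List (String × Nat)) (suff : List Char) (b : Nat)
    (kw : String) (p : Nat) (hmem : (kw, p) ∈ tbl)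
    (hsw : PySem.Chars.startswith suff kw.toList = true) :
    pvStepT tbl suff b ≤ p := by
  induction tbl generalizing b with
  | nil => simp at hmem
  | cons kp rest ih =>
      simp only [pvStepT, List.foldl_cons]
      rcases List.mem_cons.mp hmem with heq | htail
      · cases heq
        by_cases hlt : p < b
        · simp only [hsw, hlt, decide_true, Bool.and_self, if_pos]
          exact pvStepT_le rest suff p
        · have hcond : (decide (p < b) && PySem.Chars.startswith suff kw.toList) = false := by
            simp [hlt]
          rw [hcond, if_neg (by simp)]
          exact le_trans (pvStepT_le rest suff b) (by omega)
      · split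
        · rename_i h
          simp only [Bool.and_eq_true, decide_eq_true_eq] at h
          exact ih kp.2 htail
        · exact ih b htail

theorem pvStepT_mem (tbl : List (String × Nat)) (suff : List Char) (b : Nat) :
    pvStepT tbl suff b = b ∨
      ∃ kw p, (kw, p) ∈ tbl ∧ PySem.Chars.startswith suff kw.toList = true ∧ pvStepT tbl suff b = p := by
  induction tbl generalizing b with
  | nil => left; simp [pvStepT]
  | cons kp rest ih =>
      simp only [pvStepT, List.foldl_cons]
      split
      · rename_i h
        simp only [Bool.and_eq_true, decide_eq_true_eq] at h
        rcases ih kp.2 with heq | ⟨kw, p, hm, hs, he⟩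
        · right; exact ⟨kp.1, kp.2, List.mem_cons_self, h.2, heq⟩
        · right; exact ⟨kw, p, List.mem_cons_of_mem _ hm, hs, he⟩
      · rcases ih b with heq | ⟨kw, p, hm, hs, he⟩
        · left; exact heq
        · right; exact ⟨kw, p, List.mem_cons_of_mem _ hm, hs, he⟩

theorem pvStep_eq (suff : List Char) (b : Nat) : pvStep suff b = pvStepT pvTable suff b := rfl

theorem pvScan_le (cs : List Char) (b : Nat) : pvScan cs b ≤ b := by
  induction cs generalizing b with
  | nil => simp [pvScan]
  | cons c rest ih =>
      exact le_trans (ih _) (by rw [pvStep_eq]; exact pvStepT_le _ _ _)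

theorem pvScan_le_of_match (cs : List Char) (b : Nat) (kw : String) (p : Nat)
    (hne : kw.toList ≠ []) (hmem : (kw, p) ∈ pvTable)
    (hin : ∃ j, kw.toList <+: cs.drop j) : pvScan cs b ≤ p := by
  induction cs generalizing b with
  | nil =>
      exfalso
      rcases hin with ⟨j, hpre⟩
      simp only [List.drop_nil] at hpre
      exact hne (List.prefix_nil.mp hpre)
  | cons c rest ih =>
      rcases hin with ⟨j, hpre⟩
      cases j with
      | zero =>
          have hsw : PySem.Chars.startswith (c :: rest) kw.toList = true :=
            (PySem.Chars.startswith_iff _ _).mpr (by simpa using hpre)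
          simp only [pvScan]
          exact le_trans (pvScan_le rest _) (by rw [pvStep_eq]; exact pvStepT_le_of_match _ _ _ _ _ hmem hsw)
      | succ k =>
          simp only [pvScan]
          exact ih _ ⟨k, by simpa using hpre⟩

theorem pvScan_mem (cs : List Char) (b : Nat) :
    pvScan cs b = b ∨
      ∃ kw p, (kw, p) ∈ pvTable ∧ (∃ j, kw.toList <+: cs.drop j) ∧ pvScan cs b = p := by
  induction cs generalizing b with
  | nil => left; simp [pvScan]
  | cons c rest ih =>
      simp only [pvScan]
      rcases ih (pvStep (c :: rest) b) with heq | ⟨kw, p, hm, ⟨j, hj⟩, he⟩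
      · rw [heq, pvStep_eq]
        rcases pvStepT_mem pvTable (c :: rest) b with h0 | ⟨kw, p, hm, hs, he⟩
        · left; exact h0
        · right
          exact ⟨kw, p, hm, ⟨0, by simpa using (PySem.Chars.startswith_iff _ _).mp hs⟩, he⟩
      · right
        exact ⟨kw, p, hm, ⟨j + 1, by simpa using hj⟩, he⟩

-- every table entry’s keyword belongs to its category group, and conversely
theorem pvTable_group (kw : String) (p : Nat) (hmem : (kw, p) ∈ pvTable)
    (cs : List Char) (hin : PySem.Chars.isIn kw.toList cs = true) : pvBl cs p = true := by
  fin_cases hmem <;> simp_all [pvBl, pvGroup]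

theorem pvGroup_table (p : Nat) (hp : p < 6) (kw : String) (hkw : kw ∈ pvGroup p) :
    (kw, p) ∈ pvTable ∧ kw.toList ≠ [] := by
  interval_cases p <;> fin_cases hkw <;> exact ⟨by decide, by decide⟩

-- B's scan computes the least matched category index (6 when none matches)
theorem pvScan_eq_of_bl (cs : List Char) (p : Nat) (hp : p < 6)
    (htrue : pvBl cs p = true) (hfalse : ∀ q, q < p → pvBl cs q = false) :
    pvScan cs 6 = p := by
  rcases List.any_eq_true.mp htrue with ⟨kw, hkw, hin⟩
  obtain ⟨hmem, hne⟩ := pvGroup_table p hp kw hkw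
  have hle : pvScan cs 6 ≤ p := by
    apply pvScan_le_of_match cs 6 kw p hne hmem
    exact (PySem.Chars.exists_prefix_drop_iff_isIn _ _).mpr hin
  rcases pvScan_mem cs 6 with heq | ⟨kw', p', hm', hj', he'⟩
  · omega
  · have hbl : pvBl cs p' = true := by
      apply pvTable_group kw' p' hm' cs
      exact (PySem.Chars.exists_prefix_drop_iff_isIn _ _).mp hj'
    by_contra hne2
    have hlt : p' < p := by omega
    have := hfalse p' hlt
    simp [this] at hbl

theorem pvScan_eq_six (cs : List Char) (hfalse : ∀ q, q < 6 → pvBl cs q = false) :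
    pvScan cs 6 = 6 := by
  rcases pvScan_mem cs 6 with heq | ⟨kw', p', hm', hj', he'⟩
  · exact heq
  · have hbl : pvBl cs p' = true := by
      apply pvTable_group kw' p' hm' cs
      exact (PySem.Chars.exists_prefix_drop_iff_isIn _ _).mp hj'
    have hp6 : p' < 6 := by
      have := pvScan_le cs 6
      have h6 : pvScan cs 6 ≤ 6 := this
      by_cases h : p' < 6
      · exact h
      · exfalso
        fin_cases hm' <;> simp_all
    have := hfalse p' hp6
    simp [this] at hbl

-- ===== VERDICT (by name: the statement is the Claim_ definition above) =====
set_option maxHeartbeats 1000000 in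
theorem categorize_chart_spec : Claim_equal_categorize_chart := by
  intro chart_name _
  unfold Spec_categorize_chart categorize_chart categorize_chart_alt
  set nl := PySem.Str.lower chart_name with hnl
  set cs := nl.toList with hcs
  have hb0 : pvBl cs 0 = (PySem.Str.isIn "sid" nl || PySem.Str.isIn "departure" nl) := by
    simp [pvBl, pvGroup, hcs]
  have hb1 : pvBl cs 1 = (PySem.Str.isIn "star" nl || PySem.Str.isIn "arrival" nl) := by
    simp [pvBl, pvGroup, hcs]
  have hb2 : pvBl cs 2 =
      (["approach", "ils", "rnav", "vor", "ndb", "rnp", "gnss", "visual apch"]).any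
        (fun keyword => PySem.Str.isIn keyword nl) := by
    simp [pvBl, pvGroup, hcs]
  have hb3 : pvBl cs 3 =
      (["aerodrome chart", "airport", "parking", "taxi", "apron", "ground movement", "obstruction"]).any
        (fun keyword => PySem.Str.isIn keyword nl) := by
    simp [pvBl, pvGroup, hcs]
  have hb4 : pvBl cs 4 = PySem.Str.isIn "noise" nl := by
    simp [pvBl, pvGroup, hcs]
  have hb5 : pvBl cs 5 = (PySem.Str.isIn "heliport" nl || PySem.Str.isIn "helicopter" nl) := by
    simp [pvBl, pvGroup, hcs]
  dsimp only
  rw [← hb0, ← hb1, ← hb2, ← hb3, ← hb4, ← hb5]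
  by_cases h0 : pvBl cs 0 = true
  · have hs : pvScan cs 6 = 0 :=
      pvScan_eq_of_bl cs 0 (by norm_num) h0 (by intro q hq; omega)
    rw [h0, hs]; rfl
  · simp only [Bool.not_eq_true] at h0
    by_cases h1 : pvBl cs 1 = true
    · have hs : pvScan cs 6 = 1 :=
        pvScan_eq_of_bl cs 1 (by norm_num) h1 (by intro q hq; rcases q with _|q; exacts [h0, by omega])
      rw [h0, h1, hs]; rfl
    · simp only [Bool.not_eq_true] at h1
      by_cases h2 : pvBl cs 2 = true
      · have hs : pvScan cs 6 = 2 :=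
          pvScan_eq_of_bl cs 2 (by norm_num) h2 (by intro q hq; rcases q with _|_|q; exacts [h0, h1, by omega])
        rw [h0, h1, h2, hs]; rfl
      · simp only [Bool.not_eq_true] at h2
        by_cases h3 : pvBl cs 3 = true
        · have hs : pvScan cs 6 = 3 :=
            pvScan_eq_of_bl cs 3 (by norm_num) h3 (by intro q hq; rcases q with _|_|_|q; exacts [h0, h1, h2, by omega])
          rw [h0, h1, h2, h3, hs]; rfl
        · simp only [Bool.not_eq_true] at h3
          by_cases h4 : pvBl cs 4 = true
          · have hs : pvScan cs 6 = 4 :=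
              pvScan_eq_of_bl cs 4 (by norm_num) h4 (by intro q hq; rcases q with _|_|_|_|q; exacts [h0, h1, h2, h3, by omega])
            rw [h0, h1, h2, h3, h4, hs]; rfl
          · simp only [Bool.not_eq_true] at h4
            by_cases h5 : pvBl cs 5 = true
            · have hs : pvScan cs 6 = 5 :=
                pvScan_eq_of_bl cs 5 (by norm_num) h5 (by intro q hq; rcases q with _|_|_|_|_|q; exacts [h0, h1, h2, h3, h4, by omega])
              rw [h0, h1, h2, h3, h4, h5, hs]; rfl
            · simp only [Bool.not_eq_true] at h5
              have hs : pvScan cs 6 = 6 :=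
                pvScan_eq_six cs (by intro q hq; rcases q with _|_|_|_|_|_|q; exacts [h0, h1, h2, h3, h4, h5, by omega])
              rw [h0, h1, h2, h3, h4, h5, hs]; rfl
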